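-- pv_equiv track=rewrite | github.com/ZG21/Algorithm-Checker | services/generate_full_combs.py | generate_full_combs
-- ===== SOURCE A (Python) =====
-- def generar_combinaciones(array):
--     def backtrack(start, path):
--         # Agregar la combinación actual a los resultados
--         combinaciones.append(path)
--         # Generar todas las combinaciones posibles comenzando desde 'start'
--         for i in range(start, len(array)):
--             backtrack(i + 1, path + [array[i]])
--     combinaciones = []
--     backtrack(0, [])
--     return combinaciones[1:]  # Excluir la combinación vacía
--
-- def generar_parejas_vacio(arr, vacios, estado):
--     for elem in arr:
--         if estado == "actual":
--             pareja1 = [["0"], [elem]]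
--             if pareja1 not in vacios:
--                 vacios.append(pareja1)
--         if estado == "futuro":
--             pareja2 = [[elem], ["0"]]
--             if pareja2 not in vacios:
--                 vacios.append(pareja2)
--     return vacios
--
-- def generate_full_combs(component):
--     numeradores = generar_combinaciones(component[0])
--     denominadores = generar_combinaciones(component[1])
--     full_comb = []
--     vacios_actuales = []
--     vacios_futuros = []
--     for comb in numeradores:
--         for comb2 in denominadores:
--             if len(comb) > 1:
--                 vacios_futuros = generar_parejas_vacio(comb, vacios_futuros, "futuro")
--             if len(comb2) > 1:
--                 vacios_actuales = generar_parejas_vacio(comb2, vacios_actuales, "actual")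
--             if not (comb == component[0] and comb2 == component[1]):
--                 full_comb.append([comb, comb2])
--     full_comb.extend(vacios_actuales)
--     full_comb.extend(vacios_futuros)
--     return full_comb
-- ===== SOURCE B (Python) =====
-- def _ne_subsets(arr):
--     # non-empty subsets (increasing indices) in DFS pre-order, by structural recursion
--     if not arr:
--         return []
--     x, rest = arr[0], arr[1:]
--     tail = _ne_subsets(rest)
--     return [[x]] + [[x] + s for s in tail] + tail
--
-- def _dedup(arr):
--     out = []
--     for e in arr:
--         if e not in out:
--             out.append(e)
--     return out
--
-- def generate_full_combs(component):
--     a, b = component[0], component[1]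
--     nums = _ne_subsets(a)
--     dens = _ne_subsets(b)
--     full = [[c1, c2] for c1 in nums for c2 in dens
--             if not (c1 == a and c2 == b)]
--     if nums and len(b) > 1:
--         full += [[["0"], [e]] for e in _dedup(b)]
--     if dens and len(a) > 1:
--         full += [[[e], ["0"]] for e in _dedup(a)]
--     return full
-- ===== Notes on version B (the rewrite author's own statement) =====
-- stated objective: simpler
-- what changed: Replaces A's index-based backtracking with a structural recursion for the subset lists, builds full_comb by a plain double comprehension, and computes the two 'vacios' lists directly in one dedup pass over each component instead of accumulating them with membership tests inside the exponential double loop.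
import Mathlib
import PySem

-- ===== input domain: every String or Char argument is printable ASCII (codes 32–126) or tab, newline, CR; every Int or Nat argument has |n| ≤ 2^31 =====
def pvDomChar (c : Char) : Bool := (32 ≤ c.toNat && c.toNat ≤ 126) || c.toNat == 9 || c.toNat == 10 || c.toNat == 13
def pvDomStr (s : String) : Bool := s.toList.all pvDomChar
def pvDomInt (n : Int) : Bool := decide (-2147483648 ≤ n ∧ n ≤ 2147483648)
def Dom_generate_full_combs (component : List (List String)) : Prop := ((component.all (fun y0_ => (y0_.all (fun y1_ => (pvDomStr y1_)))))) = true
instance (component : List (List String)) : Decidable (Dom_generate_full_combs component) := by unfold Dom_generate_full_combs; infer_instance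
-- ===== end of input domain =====

-- One honest line: B replaces A's index backtracking by a structural recursion for the DFS
-- subset lists, builds the pair list by a plain double comprehension, and computes the two
-- 'vacios' lists directly by one dedup pass over each component (objective: simpler).

-- ===== PORT A =====
-- backtrack(start, path): appends path, then loops i = start .. len-1 recursing on (i+1, path + [array[i]]).
mutual
def pvBT (array : List String) (start : Nat) (path : List String)
    (acc : List (List String)) : List (List String) :=
  pvBTloop array start path (acc ++ [path])
termination_by (array.length - start, 1)

def pvBTloop (array : List String) (i : Nat) (path : List String)
    (acc : List (List String)) : List (List String) :=
  if h : i < array.length then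
    pvBTloop array (i + 1) path (pvBT array (i + 1) (path ++ [array[i]]) acc)
  else acc
termination_by (array.length - i, 0)
decreasing_by
  · exact Prod.Lex.left _ _ (by omega)
  · exact Prod.Lex.left _ _ (by omega)
end

def generar_combinaciones (array : List String) : List (List String) :=
  (pvBT array 0 [] []).drop 1  -- combinaciones[1:]

def generar_parejas_vacio (arr : List String) (vacios : List (List (List String)))
    (estado : String) : List (List (List String)) :=
  arr.foldl (fun v elem =>
    let v1 := if estado == "actual" then
        (if [["0"], [elem]] ∈ v then v else v ++ [[["0"], [elem]]]) else v
    let v2 := if estado == "futuro" then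
        (if [[elem], ["0"]] ∈ v1 then v1 else v1 ++ [[[elem], ["0"]]]) else v1
    v2) vacios

def generate_full_combs (component : List (List String)) : List (List (List String)) :=
  let numeradores := generar_combinaciones (component.getD 0 [])
  let denominadores := generar_combinaciones (component.getD 1 [])
  let st := numeradores.foldl (fun st comb =>
    denominadores.foldl (fun st comb2 =>
      let fut := if comb.length > 1 then generar_parejas_vacio comb st.2.2 "futuro" else st.2.2
      let act := if comb2.length > 1 then generar_parejas_vacio comb2 st.2.1 "actual" else st.2.1
      let full := if ¬(comb = component.getD 0 [] ∧ comb2 = component.getD 1 [])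
                  then st.1 ++ [[comb, comb2]] else st.1
      (full, act, fut)) st) ([], [], [])
  st.1 ++ st.2.1 ++ st.2.2

-- ===== PORT B =====
def neSubsets : List String → List (List String)
  | [] => []
  | x :: rest =>
    let tail := neSubsets rest
    [x] :: (tail.map (fun s => x :: s) ++ tail)

def pvDedup (arr : List String) : List String :=
  arr.foldl (fun out e => if e ∈ out then out else out ++ [e]) []

def generate_full_combs_alt (component : List (List String)) : List (List (List String)) :=
  let a := component.getD 0 []
  let b := component.getD 1 []
  let nums := neSubsets a
  let dens := neSubsets b
  let full := nums.flatMap (fun c1 =>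
    (dens.filter (fun c2 => ¬(c1 = a ∧ c2 = b))).map (fun c2 => [c1, c2]))
  let full := if nums ≠ [] ∧ b.length > 1
              then full ++ (pvDedup b).map (fun e => [["0"], [e]]) else full
  let full := if dens ≠ [] ∧ a.length > 1
              then full ++ (pvDedup a).map (fun e => [[e], ["0"]]) else full
  full

-- ===== PRECONDITION & SPEC =====
-- Python A indexes component[0] and component[1]: it raises IndexError when component has
-- fewer than two entries, so exactly those inputs are excluded.
def Pre_generate_full_combs (component : List (List String)) : Prop := 2 ≤ component.length
instance (component : List (List String)) : Decidable (Pre_generate_full_combs component) := by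
  unfold Pre_generate_full_combs; infer_instance

def pvWitness_generate_full_combs : List (List String) := [["x"], ["y"]]

def Spec_generate_full_combs (component : List (List String)) (out : List (List (List String))) : Prop := out = generate_full_combs_alt component
instance (component : List (List String)) (out : List (List (List String))) : Decidable (Spec_generate_full_combs component out) := by unfold Spec_generate_full_combs; infer_instance

-- ===== CLAIM (what is proved, stated in full; the proofs are below) =====
def Claim_equal_generate_full_combs : Prop := ∀ (component : List (List String)), Dom_generate_full_combs component → Pre_generate_full_combs component → Spec_generate_full_combs component (generate_full_combs component)

-- ===== LEMMAS AND PROOFS =====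

-- abbreviations used only by the proofs
def pvAddS (f : String → List (List String)) (v : List (List (List String))) (e : String) :
    List (List (List String)) :=
  if f e ∈ v then v else v ++ [f e]

def pvSeq (f : String → List (List String)) (v : List (List (List String)))
    (l : List String) : List (List (List String)) :=
  l.foldl (pvAddS f) v

def pvPairF (e : String) : List (List String) := [[e], ["0"]]
def pvPairA (e : String) : List (List String) := [["0"], [e]]

-- ---- Part 1: the backtracking enumeration equals neSubsets ----

lemma pvBTloop_spec (array : List String) :
    ∀ k i path acc, array.length - i ≤ k →
      pvBTloop array i path acc
        = acc ++ (neSubsets (array.drop i)).map (fun s => path ++ s) := by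
  intro k
  induction k with
  | zero =>
    intro i path acc h
    have hge : array.length ≤ i := by omega
    rw [pvBTloop]
    simp [Nat.not_lt.mpr hge, List.drop_eq_nil_of_le hge, neSubsets]
  | succ k ih =>
    intro i path acc h
    rw [pvBTloop]
    by_cases hlt : i < array.length
    · have hdrop : array.drop i = array[i] :: array.drop (i + 1) :=
        List.drop_eq_getElem_cons hlt
      have h1 : array.length - (i + 1) ≤ k := by omega
      rw [dif_pos hlt, pvBT, ih (i + 1) _ _ h1, ih (i + 1) _ _ h1, hdrop]
      have hfun : (fun s => path ++ (array[i] :: s)) = (fun s => (path ++ [array[i]]) ++ s) := by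
        funext s; simp
      simp [neSubsets, List.map_map, Function.comp_def, hfun]
    · have hge : array.length ≤ i := by omega
      rw [dif_neg hlt]
      simp [List.drop_eq_nil_of_le hge, neSubsets]

lemma generar_combinaciones_eq (array : List String) :
    generar_combinaciones array = neSubsets array := by
  unfold generar_combinaciones
  rw [pvBT, pvBTloop_spec array (array.length) 0 [] _ (by omega)]
  simp

-- ---- Part 3: pvSeq machinery ----

lemma mem_pvAddS_self (f : String → List (List String)) (v : List (List (List String))) (e : String) :
    f e ∈ pvAddS f v e := by
  unfold pvAddS; split_ifs with h
  · exact h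
  · simp

lemma pvAddS_mono (f : String → List (List String)) (v : List (List (List String)))
    (e : String) (p : List (List String)) (hp : p ∈ v) : p ∈ pvAddS f v e := by
  unfold pvAddS; split_ifs
  · exact hp
  · simp [hp]

lemma pvSeq_mono (f : String → List (List String)) (l : List String) :
    ∀ v p, p ∈ v → p ∈ pvSeq f v l := by
  induction l with
  | nil => intro v p hp; exact hp
  | cons x xs ih =>
    intro v p hp
    exact ih _ _ (pvAddS_mono f v x p hp)

lemma mem_pvSeq_self (f : String → List (List String)) (l : List String) :
    ∀ v e, e ∈ l → f e ∈ pvSeq f v l := by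
  induction l with
  | nil => intro v e he; simp at he
  | cons x xs ih =>
    intro v e he
    rcases List.mem_cons.mp he with h | h
    · subst h
      exact pvSeq_mono f xs _ _ (mem_pvAddS_self f v e)
    · exact ih _ _ h

lemma pvAddS_noop (f : String → List (List String)) (v : List (List (List String)))
    (e : String) (h : f e ∈ v) : pvAddS f v e = v := by
  unfold pvAddS; simp [h]

lemma pvSeq_noop (f : String → List (List String)) (l : List String) :
    ∀ v, (∀ e ∈ l, f e ∈ v) → pvSeq f v l = v := by
  induction l with
  | nil => intro v _; rfl
  | cons x xs ih =>
    intro v h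
    show pvSeq f (pvAddS f v x) xs = v
    rw [pvAddS_noop f v x (h x (by simp))]
    exact ih v (fun e he => h e (by simp [he]))

lemma pvSeq_append (f : String → List (List String)) (v : List (List (List String)))
    (l1 l2 : List String) : pvSeq f v (l1 ++ l2) = pvSeq f (pvSeq f v l1) l2 := by
  unfold pvSeq; exact List.foldl_append

lemma pvSeq_idem (f : String → List (List String)) (v : List (List (List String)))
    (l : List String) : pvSeq f (pvSeq f v l) l = pvSeq f v l :=
  pvSeq_noop f l _ (fun e he => mem_pvSeq_self f l v e he)

lemma pvSeq_flatMap_cons (f : String → List (List String)) (x : String) :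
    ∀ (l : List (List String)) (v : List (List (List String))), l ≠ [] →
      pvSeq f v (l.flatMap (fun s => x :: s)) = pvSeq f v (x :: l.flatten) := by
  intro l
  induction l with
  | nil => intro v h; exact absurd rfl h
  | cons s l' ih =>
    intro v _
    cases l' with
    | nil => simp
    | cons s' l'' =>
      have hne : (s' :: l'') ≠ ([] : List (List String)) := by simp
      have hx : f x ∈ pvSeq f v (x :: s) := by
        exact pvSeq_mono f s _ _ (mem_pvAddS_self f v x)
      calc pvSeq f v ((s :: s' :: l'').flatMap (fun t => x :: t))
          = pvSeq f (pvSeq f v (x :: s)) ((s' :: l'').flatMap (fun t => x :: t)) := by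
            rw [List.flatMap_cons, pvSeq_append]
        _ = pvSeq f (pvSeq f v (x :: s)) (x :: (s' :: l'').flatten) := ih _ hne
        _ = pvSeq f (pvAddS f (pvSeq f v (x :: s)) x) ((s' :: l'').flatten) := rfl
        _ = pvSeq f (pvSeq f v (x :: s)) ((s' :: l'').flatten) := by
            rw [pvAddS_noop f _ x hx]
        _ = pvSeq f v ((x :: s) ++ (s' :: l'').flatten) := by rw [pvSeq_append]
        _ = pvSeq f v (x :: (s :: s' :: l'').flatten) := by simp

lemma neSubsets_ne_nil (r : List String) (h : r ≠ []) : neSubsets r ≠ [] := by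
  cases r with
  | nil => exact absurd rfl h
  | cons x t => simp [neSubsets]

lemma mem_neSubsets_ne_nil : ∀ (r : List String), ∀ s ∈ neSubsets r, s ≠ [] := by
  intro r
  induction r with
  | nil => intro s hs; simp [neSubsets] at hs
  | cons x t ih =>
    intro s hs
    simp only [neSubsets, List.mem_cons, List.mem_append, List.mem_map] at hs
    rcases hs with h | ⟨u, _, h⟩ | h
    · subst h; simp
    · subst h; simp
    · exact ih s h

lemma mem_neSubsets_subset : ∀ (r : List String), ∀ s ∈ neSubsets r, ∀ e ∈ s, e ∈ r := by
  intro r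
  induction r with
  | nil => intro s hs; simp [neSubsets] at hs
  | cons x t ih =>
    intro s hs e he
    simp only [neSubsets, List.mem_cons, List.mem_append, List.mem_map] at hs
    rcases hs with h | ⟨u, hu, h⟩ | h
    · subst h; simp at he; simp [he]
    · subst h
      rcases List.mem_cons.mp he with h | h
      · simp [h]
      · exact List.mem_cons_of_mem _ (ih u hu e h)
    · exact List.mem_cons_of_mem _ (ih s h e he)

-- flatten of the whole DFS subset list adds exactly the elements of r, in order
lemma pvSeq_flatten_neSubsets (f : String → List (List String)) :
    ∀ (r : List String) (v : List (List (List String))),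
      pvSeq f v (neSubsets r).flatten = pvSeq f v r := by
  intro r
  induction r with
  | nil => intro v; simp [neSubsets]
  | cons y t ih =>
    intro v
    have hflat : (neSubsets (y :: t)).flatten
        = y :: ((neSubsets t).flatMap (fun s => y :: s) ++ (neSubsets t).flatten) := by
      simp [neSubsets, List.flatMap]
    rw [hflat]
    cases t with
    | nil => simp [neSubsets]
    | cons y' t' =>
      have hne : neSubsets (y' :: t') ≠ [] := neSubsets_ne_nil _ (by simp)
      have hy : f y ∈ pvAddS f v y := mem_pvAddS_self f v y
      calc pvSeq f v (y :: ((neSubsets (y' :: t')).flatMap (fun s => y :: s) ++ (neSubsets (y' :: t')).flatten))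
          = pvSeq f (pvSeq f (pvAddS f v y) ((neSubsets (y' :: t')).flatMap (fun s => y :: s)))
              ((neSubsets (y' :: t')).flatten) := by
            show pvSeq f (pvAddS f v y) _ = _
            rw [pvSeq_append]
        _ = pvSeq f (pvSeq f (pvAddS f v y) (y :: (neSubsets (y' :: t')).flatten))
              ((neSubsets (y' :: t')).flatten) := by
            rw [pvSeq_flatMap_cons f y _ _ hne]
        _ = pvSeq f (pvSeq f (pvAddS f v y) ((neSubsets (y' :: t')).flatten))
              ((neSubsets (y' :: t')).flatten) := by
            show pvSeq f (pvSeq f (pvAddS f (pvAddS f v y) y) _) _ = _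
            rw [pvAddS_noop f _ y hy]
        _ = pvSeq f (pvSeq f (pvAddS f v y) (y' :: t')) ((neSubsets (y' :: t')).flatten) := by
            rw [ih (pvAddS f v y)]
        _ = pvSeq f (pvSeq f (pvAddS f v y) (y' :: t')) (y' :: t') :=
            ih (pvSeq f (pvAddS f v y) (y' :: t'))
        _ = pvSeq f (pvAddS f v y) (y' :: t') := pvSeq_idem f _ _
        _ = pvSeq f v (y :: y' :: t') := rfl

-- the length-filtered flatten: same additions, provided r has ≥ 2 elements
lemma pvSeq_filtered (f : String → List (List String)) (x : String) (r : List String)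
    (hr : r ≠ []) (v : List (List (List String))) :
    pvSeq f v (((neSubsets (x :: r)).filter (fun s => decide (s.length > 1))).flatten)
      = pvSeq f v (x :: r) := by
  have hfilter : (neSubsets (x :: r)).filter (fun s => decide (s.length > 1))
      = (neSubsets r).map (fun s => x :: s)
        ++ (neSubsets r).filter (fun s => decide (s.length > 1)) := by
    have hmap : ((neSubsets r).map (fun s => x :: s)).filter (fun s => decide (s.length > 1))
        = (neSubsets r).map (fun s => x :: s) := by
      apply List.filter_eq_self.mpr
      intro s hs
      rcases List.mem_map.mp hs with ⟨u, hu, rfl⟩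
      have hu' := mem_neSubsets_ne_nil r u hu
      cases u with
      | nil => exact absurd rfl hu'
      | cons a bb => simp
    simp [neSubsets, List.filter_append, hmap]
  rw [hfilter, List.flatten_append, pvSeq_append]
  have hflatMap : ((neSubsets r).map (fun s => x :: s)).flatten
      = (neSubsets r).flatMap (fun s => x :: s) := by simp [List.flatMap]
  rw [hflatMap, pvSeq_flatMap_cons f x _ _ (neSubsets_ne_nil r hr)]
  have h1 : pvSeq f v (x :: (neSubsets r).flatten)
      = pvSeq f (pvAddS f v x) r := by
    show pvSeq f (pvAddS f v x) _ = _
    rw [pvSeq_flatten_neSubsets]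
  rw [h1]
  have hnoop : pvSeq f (pvSeq f (pvAddS f v x) r)
      (((neSubsets r).filter (fun s => decide (s.length > 1))).flatten) = pvSeq f (pvAddS f v x) r := by
    apply pvSeq_noop
    intro e he
    rcases List.mem_flatten.mp he with ⟨s, hs, hes⟩
    have hs' := List.mem_of_mem_filter hs
    exact mem_pvSeq_self f r _ e (mem_neSubsets_subset r s hs' e hes)
  rw [hnoop]
  rfl

-- dedup link: pvSeq with an injective pair-maker is mapped dedup
lemma pvSeq_map_dedup (f : String → List (List String)) (hf : Function.Injective f) :
    ∀ (l out : List String),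
      pvSeq f (out.map f) l = (l.foldl (fun o e => if e ∈ o then o else o ++ [e]) out).map f := by
  intro l
  induction l with
  | nil => intro out; rfl
  | cons x xs ih =>
    intro out
    have hmem : (f x ∈ out.map f) ↔ (x ∈ out) := by
      constructor
      · intro h; rcases List.mem_map.mp h with ⟨y, hy, he⟩; rwa [← hf he]
      · intro h; exact List.mem_map.mpr ⟨x, h, rfl⟩
    show pvSeq f (pvAddS f (out.map f) x) xs = _
    by_cases hx : x ∈ out
    · rw [pvAddS_noop f _ x (hmem.mpr hx)]
      simpa [List.foldl_cons, hx] using ih out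
    · have : pvAddS f (out.map f) x = (out ++ [x]).map f := by
        unfold pvAddS
        rw [if_neg (fun h => hx (hmem.mp h))]
        simp
      rw [this]
      simpa [List.foldl_cons, hx] using ih (out ++ [x])

lemma pairF_inj : Function.Injective pvPairF := by
  intro a b h; simpa [pvPairF] using h

lemma pairA_inj : Function.Injective pvPairA := by
  intro a b h; simpa [pvPairA] using h

-- ---- Part 4: decomposing A's double fold ----

-- the vacios result of one full pass over a subset list (either side)
def pvVac (f : String → List (List String)) (combs : List (List String))
    (v : List (List (List String))) : List (List (List String)) :=
  combs.foldl (fun w c => if c.length > 1 then pvSeq f w c else w) v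

lemma pvVac_eq_filtered (f : String → List (List String)) :
    ∀ (combs : List (List String)) (v : List (List (List String))),
      pvVac f combs v = pvSeq f v ((combs.filter (fun s => decide (s.length > 1))).flatten) := by
  intro combs
  induction combs with
  | nil => intro v; rfl
  | cons c cs ih =>
    intro v
    show pvVac f cs _ = _
    by_cases hc : c.length > 1
    · rw [ih, List.filter_cons, if_pos (by simpa using hc)]
      simp only [List.flatten_cons, pvSeq_append]
      simp [hc]
    · rw [ih, List.filter_cons, if_neg (by simpa using hc)]
      simp [hc]

-- inner loop decomposition
lemma inner_decomp (a b comb : List String) (dens : List (List String)) :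
    ∀ (F AC FU : List (List (List String))),
      dens.foldl (fun st comb2 =>
        let fut := if comb.length > 1 then pvSeq pvPairF st.2.2 comb else st.2.2
        let act := if comb2.length > 1 then pvSeq pvPairA st.2.1 comb2 else st.2.1
        let full := if ¬(comb = a ∧ comb2 = b) then st.1 ++ [[comb, comb2]] else st.1
        (full, act, fut)) (F, AC, FU)
      = (F ++ (dens.filter (fun c2 => decide (¬(comb = a ∧ c2 = b)))).map (fun c2 => [comb, c2]),
         pvVac pvPairA dens AC,
         if comb.length > 1 ∧ dens ≠ [] then pvSeq pvPairF FU comb else FU) := by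
  induction dens with
  | nil => intro F AC FU; simp [pvVac]
  | cons c2 rest ih =>
    intro F AC FU
    rw [List.foldl_cons, ih]
    simp only [List.filter_cons]
    by_cases hcc : comb = a ∧ c2 = b
    · have h1 : ¬¬(comb = a ∧ c2 = b) := not_not_intro hcc
      refine Prod.ext ?_ (Prod.ext ?_ ?_) <;> simp only [if_neg (not_not_intro hcc)]
      · simp [hcc]
      · rfl
      · by_cases hcl : comb.length > 1
        · by_cases hrest : rest = (([] : List (List String)))
          · simp [hcl, hrest]
          · simp [hcl, hrest, pvSeq_idem]
        · simp [hcl]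
    · refine Prod.ext ?_ (Prod.ext ?_ ?_) <;> simp only [if_pos hcc]
      · simp [hcc]
      · rfl
      · by_cases hcl : comb.length > 1
        · by_cases hrest : rest = (([] : List (List String)))
          · simp [hcl, hrest]
          · simp [hcl, hrest, pvSeq_idem]
        · simp [hcl]

-- outer loop decomposition
lemma outer_decomp (a b : List String) (dens : List (List String)) :
    ∀ (nums : List (List String)) (F AC FU : List (List (List String))),
      nums.foldl (fun st comb =>
        dens.foldl (fun st comb2 =>
          let fut := if comb.length > 1 then pvSeq pvPairF st.2.2 comb else st.2.2
          let act := if comb2.length > 1 then pvSeq pvPairA st.2.1 comb2 else st.2.1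
          let full := if ¬(comb = a ∧ comb2 = b) then st.1 ++ [[comb, comb2]] else st.1
          (full, act, fut)) st) (F, AC, FU)
      = (F ++ nums.flatMap (fun comb =>
            (dens.filter (fun c2 => decide (¬(comb = a ∧ c2 = b)))).map (fun c2 => [comb, c2])),
         nums.foldl (fun w _ => pvVac pvPairA dens w) AC,
         if dens ≠ [] then pvVac pvPairF nums FU else FU) := by
  intro nums
  induction nums with
  | nil => intro F AC FU; simp [pvVac]
  | cons comb rest ih =>
    intro F AC FU
    rw [List.foldl_cons, inner_decomp, ih]
    by_cases hd : dens = (([] : List (List String)))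
    · simp [hd, pvVac]
    · refine Prod.ext ?_ (Prod.ext rfl ?_)
      · simp
      · simp only [if_pos hd]
        show _ = pvVac pvPairF (comb :: rest) FU
        unfold pvVac
        rw [List.foldl_cons]
        simp [hd]

-- repeated identical pvVac passes collapse
lemma foldl_pvVac_const (f : String → List (List String)) (dens : List (List String)) :
    ∀ (nums : List (List String)) (v : List (List (List String))),
      nums.foldl (fun w _ => pvVac f dens w) v
      = if nums = [] then v else pvVac f dens v := by
  intro nums
  induction nums with
  | nil => intro v; rfl
  | cons c cs ih =>
    intro v
    rw [List.foldl_cons, ih]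
    by_cases hcs : cs = (([] : List (List String)))
    · simp [hcs]
    · have : pvVac f dens (pvVac f dens v) = pvVac f dens v := by
        simp only [pvVac_eq_filtered]
        exact pvSeq_idem f v _
      simp [hcs, this]

-- the vacios value for one component, in B's closed form
lemma pvVac_closed (f : String → List (List String)) (hf : Function.Injective f)
    (c : List String) :
    pvVac f (neSubsets c) []
      = if c.length > 1 then (pvDedup c).map f else [] := by
  rw [pvVac_eq_filtered]
  cases c with
  | nil => simp [neSubsets, pvSeq]
  | cons x r =>
    cases r with
    | nil => simp [neSubsets, pvSeq, List.filter]
    | cons y t =>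
      have h2 : (x :: y :: t).length > 1 := by simp
      rw [if_pos h2, pvSeq_filtered f x (y :: t) (by simp) []]
      have := pvSeq_map_dedup f hf (x :: y :: t) []
      simpa [pvDedup] using this

lemma flatMap_nil_fun (l : List (List String)) :
    (l.flatMap (fun _ => ([] : List (List (List String))))) = [] := by
  induction l with
  | nil => rfl
  | cons x xs ih => simp [ih]

-- ===== VERDICT (by name: the statement is the Claim_ definition above) =====
theorem generate_full_combs_spec : Claim_equal_generate_full_combs := by
  intro component _ _
  unfold Spec_generate_full_combs generate_full_combs generate_full_combs_alt
  simp only [generar_combinaciones_eq]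
  set a := component.getD 0 []
  set b := component.getD 1 []
  have hgpv : (fun (st : List (List (List String)) × List (List (List String)) × List (List (List String))) comb =>
      (neSubsets b).foldl (fun st comb2 =>
        let fut := if comb.length > 1 then generar_parejas_vacio comb st.2.2 "futuro" else st.2.2
        let act := if comb2.length > 1 then generar_parejas_vacio comb2 st.2.1 "actual" else st.2.1
        let full := if ¬(comb = a ∧ comb2 = b) then st.1 ++ [[comb, comb2]] else st.1
        (full, act, fut)) st)
      = (fun st comb =>
      (neSubsets b).foldl (fun st comb2 =>
        let fut := if comb.length > 1 then pvSeq pvPairF st.2.2 comb else st.2.2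
        let act := if comb2.length > 1 then pvSeq pvPairA st.2.1 comb2 else st.2.1
        let full := if ¬(comb = a ∧ comb2 = b) then st.1 ++ [[comb, comb2]] else st.1
        (full, act, fut)) st) := by
    funext st comb
    congr 1
  rw [hgpv, outer_decomp a b (neSubsets b) (neSubsets a) [] [] [],
      foldl_pvVac_const, pvVac_closed pvPairA pairA_inj b, pvVac_closed pvPairF pairF_inj a]
  by_cases hA : a = []
  · simp [hA, neSubsets]
  · by_cases hB : b = []
    · simp [hB, neSubsets, neSubsets_ne_nil a hA, flatMap_nil_fun]
    · have hA' : neSubsets a ≠ [] := neSubsets_ne_nil a hA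
      have hB' : neSubsets b ≠ [] := neSubsets_ne_nil b hB
      have hPA : pvPairA = (fun e => [["0"], [e]]) := rfl
      have hPF : pvPairF = (fun e => [[e], ["0"]]) := rfl
      by_cases hal : a.length > 1 <;> by_cases hbl : b.length > 1 <;>
        simp [hA', hB', hal, hbl, hPA, hPF]
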